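-- pv_equiv track=rewrite | github.com/eduidl/rtui | rtui_app/ros/entity.py | _common_entities_with_type
-- ===== SOURCE A (Python) =====
-- def _common_link(name: str, callback: str) -> str:
--     return f"[@click={callback}('{name}')]{name}[/]"
--
-- def _common_entities_with_type(
--     entities: list[tuple[str, str | None]], callback: str, type_callback: str
-- ) -> str:
--     if not entities:
--         return " None"
--
--     out = ""
--     for i, (name, type_) in enumerate(entities):
--         if i > 0 and i % 5 == 0:
--             out += "\n"
--
--         out += f"\n  {_common_link(name, callback)}"
--         if type_ is not None:
--             out += f" \\[{_common_link(type_, type_callback)}]"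
--
--     return out
-- ===== SOURCE B (Python) =====
-- def _common_link(name: str, callback: str) -> str:
--     return f"[@click={callback}('{name}')]{name}[/]"
--
--
-- def _common_entities_with_type(
--     entities: list[tuple[str, str | None]], callback: str, type_callback: str
-- ) -> str:
--     if not entities:
--         return " None"
--
--     def item(name, type_):
--         s = f"\n  {_common_link(name, callback)}"
--         if type_ is not None:
--             s += f" \\[{_common_link(type_, type_callback)}]"
--         return s
--
--     blocks = []
--     rest = entities
--     while rest:
--         blocks.append("".join(item(name, type_) for name, type_ in rest[:5]))
--         rest = rest[5:]
--     return "\n".join(blocks)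
-- ===== Notes on version B (the rewrite author's own statement) =====
-- stated objective: alternative
-- what changed: B partitions the entities into consecutive blocks of 5 and joins the per-block item strings with a single "\n", instead of A's single indexed loop that tests i % 5 on every iteration to decide where to insert the extra newline.
import Mathlib
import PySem

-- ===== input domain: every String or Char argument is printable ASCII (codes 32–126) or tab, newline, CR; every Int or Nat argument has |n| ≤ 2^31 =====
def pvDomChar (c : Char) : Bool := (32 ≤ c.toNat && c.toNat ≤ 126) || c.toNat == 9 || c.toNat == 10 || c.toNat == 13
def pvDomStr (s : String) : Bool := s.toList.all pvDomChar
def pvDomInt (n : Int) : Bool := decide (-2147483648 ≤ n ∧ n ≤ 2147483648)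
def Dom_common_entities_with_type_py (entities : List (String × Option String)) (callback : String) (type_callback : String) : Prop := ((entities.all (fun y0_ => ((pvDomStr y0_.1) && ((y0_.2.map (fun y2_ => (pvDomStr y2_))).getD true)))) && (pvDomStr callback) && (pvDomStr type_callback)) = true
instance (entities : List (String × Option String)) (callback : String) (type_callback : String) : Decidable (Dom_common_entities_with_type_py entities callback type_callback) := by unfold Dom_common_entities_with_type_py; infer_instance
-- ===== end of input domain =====

-- B rebuilds the string chunk-wise (blocks of 5 joined by "\n") instead of A's indexed loop
-- with a separator test on every iteration; objective: alternative decomposition, same cost.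

-- ===== PORT A =====
-- _common_link(name, callback)
def pvLink (name : String) (callback : String) : String :=
  "[@click=" ++ callback ++ "('" ++ name ++ "')]" ++ name ++ "[/]"

-- the body of A's 'for i, (name, type_) in enumerate(entities)' loop
def pvAstep (callback type_callback : String) (out : String) (p : Int × (String × Option String)) : String :=
  let i := p.1
  let name := p.2.1
  let type_ := p.2.2
  let out := if i > 0 ∧ PySem.Int.mod i 5 = 0 then out ++ "\n" else out
  let out := out ++ ("\n  " ++ pvLink name callback)
  match type_ with
  | some t => out ++ (" \\[" ++ pvLink t type_callback ++ "]")
  | none => out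

def common_entities_with_type_py (entities : List (String × Option String)) (callback : String) (type_callback : String) : String :=
  if entities = [] then " None"
  else (PySem.List.enumerate entities 0).foldl (pvAstep callback type_callback) ""

-- ===== PORT B =====
-- Source B's inner 'item' closure
def pvItem (callback type_callback : String) (e : String × Option String) : String :=
  let s := "\n  " ++ pvLink e.1 callback
  match e.2 with
  | some t => s ++ (" \\[" ++ pvLink t type_callback ++ "]")
  | none => s

-- Source B's while loop: rest[:5] on a nonempty rest is head :: (tail.take 4); rest[5:] is tail.drop 4
def pvChunks {α : Type} : List α → List (List α)
  | [] => []
  | x :: xs => (x :: xs.take 4) :: pvChunks (xs.drop 4)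
termination_by l => l.length
decreasing_by simp [List.length_drop]

def common_entities_with_type_py_alt (entities : List (String × Option String)) (callback : String) (type_callback : String) : String :=
  if entities = [] then " None"
  else
    PySem.Str.join "\n"
      ((pvChunks entities).map (fun c => PySem.Str.join "" (c.map (pvItem callback type_callback))))

-- ===== PRECONDITION & SPEC =====
def Spec_common_entities_with_type_py (entities : List (String × Option String)) (callback : String) (type_callback : String) (out : String) : Prop := out = common_entities_with_type_py_alt entities callback type_callback
instance (entities : List (String × Option String)) (callback : String) (type_callback : String) (out : String) : Decidable (Spec_common_entities_with_type_py entities callback type_callback out) := by unfold Spec_common_entities_with_type_py; infer_instance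

-- ===== CLAIM (what is proved, stated in full; the proofs are below) =====
def Claim_equal_common_entities_with_type_py : Prop := ∀ (entities : List (String × Option String)) (callback : String) (type_callback : String), Dom_common_entities_with_type_py entities callback type_callback → Spec_common_entities_with_type_py entities callback type_callback (common_entities_with_type_py entities callback type_callback)

-- ===== LEMMAS AND PROOFS =====

-- reference shape: the items in order, with an extra "\n" before every item whose
-- absolute index k is a positive multiple of 5
def pvG (callback type_callback : String) : Nat → List (String × Option String) → String
  | _, [] => ""
  | k, e :: rest =>
      (if 0 < k ∧ k % 5 = 0 then "\n" else "") ++ pvItem callback type_callback e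
        ++ pvG callback type_callback (k + 1) rest

theorem pv_join_singleton (sep p : String) : PySem.Str.join sep [p] = p := by
  apply String.toList_inj.mp
  simp [PySem.Str.toList_join, PySem.Chars.join_singleton]

theorem pv_join_cons_cons (sep p q : String) (rest : List String) :
    PySem.Str.join sep (p :: q :: rest) = p ++ sep ++ PySem.Str.join sep (q :: rest) := by
  apply String.toList_inj.mp
  simp [PySem.Str.toList_join, PySem.Chars.join_cons_cons]

theorem pvAstep_eq (cb tcb : String) (out : String) (k : Nat) (e : String × Option String) :
    pvAstep cb tcb out ((k : Int), e)
      = out ++ ((if 0 < k ∧ k % 5 = 0 then "\n" else "") ++ pvItem cb tcb e) := by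
  have hcond : ((k : Int) > 0 ∧ PySem.Int.mod (k : Int) 5 = 0) ↔ (0 < k ∧ k % 5 = 0) := by
    rw [PySem.Int.mod_eq_emod_of_pos (by norm_num)]
    omega
  rcases e with ⟨name, type_⟩
  cases type_ <;>
    · simp only [pvAstep, pvItem, hcond]
      split_ifs <;> simp [String.append_assoc, String.empty_append]

theorem pvA_fold (cb tcb : String) (l : List (String × Option String)) :
    ∀ (k : Nat) (out : String),
      (PySem.List.enumerate l (k : Int)).foldl (pvAstep cb tcb) out = out ++ pvG cb tcb k l := by
  induction l with
  | nil => intro k out; simp [PySem.List.enumerate_nil, pvG, String.append_empty]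
  | cons e rest ih =>
      intro k out
      rw [PySem.List.enumerate_cons, List.foldl_cons,
        show (k : Int) + 1 = ((k + 1 : Nat) : Int) by push_cast; ring, ih (k + 1),
        pvAstep_eq, pvG, String.append_assoc]

theorem pvG_shift (cb tcb : String) (l : List (String × Option String)) :
    ∀ k : Nat, 1 ≤ k → pvG cb tcb (k + 5) l = pvG cb tcb k l := by
  induction l with
  | nil => intro k _; rfl
  | cons e rest ih =>
      intro k hk
      simp only [pvG]
      rw [if_congr (by omega : (0 < k + 5 ∧ (k + 5) % 5 = 0) ↔ (0 < k ∧ k % 5 = 0)) rfl rfl,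
        show k + 5 + 1 = (k + 1) + 5 by omega, ih (k + 1) (by omega)]

theorem pvG_five (cb tcb : String) (l : List (String × Option String)) :
    pvG cb tcb 5 l = if l = [] then "" else "\n" ++ pvG cb tcb 0 l := by
  cases l with
  | nil => rfl
  | cons e rest =>
      simp only [pvG, reduceCtorEq, if_false,
        show (5 : Nat) + 1 = 1 + 5 by omega, pvG_shift cb tcb rest 1 le_rfl]
      norm_num [String.append_assoc, String.empty_append]

theorem pvG_small (cb tcb : String) (l : List (String × Option String)) (h : l.length ≤ 5) :
    PySem.Str.join "" (l.map (pvItem cb tcb)) = pvG cb tcb 0 l := by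
  rcases l with _ | ⟨a, _ | ⟨b, _ | ⟨c, _ | ⟨d, _ | ⟨e, tl⟩⟩⟩⟩⟩
  · apply String.toList_inj.mp
    simp [PySem.Str.toList_join, PySem.Chars.join_nil, pvG]
  · simp only [List.map_cons, List.map_nil, pv_join_singleton, pvG]
    norm_num [String.append_assoc, String.append_empty, String.empty_append]
  · simp only [List.map_cons, List.map_nil, pv_join_cons_cons, pv_join_singleton, pvG]
    norm_num [String.append_assoc, String.append_empty, String.empty_append]
  · simp only [List.map_cons, List.map_nil, pv_join_cons_cons, pv_join_singleton, pvG]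
    norm_num [String.append_assoc, String.append_empty, String.empty_append]
  · simp only [List.map_cons, List.map_nil, pv_join_cons_cons, pv_join_singleton, pvG]
    norm_num [String.append_assoc, String.append_empty, String.empty_append]
  · have htl : tl = [] := by
      simp only [List.length_cons] at h
      exact List.eq_nil_of_length_eq_zero (by omega)
    subst htl
    simp only [List.map_cons, List.map_nil, pv_join_cons_cons, pv_join_singleton, pvG]
    norm_num [String.append_assoc, String.append_empty, String.empty_append]

theorem pvChunks_ne_nil {α : Type} (l : List α) (h : l ≠ []) : pvChunks l ≠ [] := by
  cases l with
  | nil => exact absurd rfl h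
  | cons x xs => rw [pvChunks]; exact List.cons_ne_nil _ _

theorem pvB_join (cb tcb : String) :
    ∀ (n : Nat) (l : List (String × Option String)), l.length ≤ n → l ≠ [] →
      PySem.Str.join "\n" ((pvChunks l).map (fun c => PySem.Str.join "" (c.map (pvItem cb tcb))))
        = pvG cb tcb 0 l := by
  intro n
  induction n with
  | zero => intro l hl hne; cases l with
      | nil => exact absurd rfl hne
      | cons x xs => simp at hl
  | succ n ih =>
      intro l hl hne
      rcases l with _ | ⟨x, xs⟩
      · exact absurd rfl hne
      simp only [pvChunks]
      by_cases hd : xs.drop 4 = []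
      · -- single chunk: xs has at most 4 elements
        have hx : xs.length ≤ 4 := by
          have := congrArg List.length hd
          simp at this
          omega
        rw [hd]
        simp only [pvChunks]
        rw [List.map_cons, List.map_nil, pv_join_singleton,
          List.take_of_length_le hx]
        exact pvG_small cb tcb (x :: xs) (by simp; omega)
      · -- xs has at least 5 elements: expose the first five entries of l
        have hx5 : 5 ≤ xs.length := by
          by_contra hlt
          exact hd (List.drop_eq_nil_of_le (by omega))
        rcases xs with _ | ⟨b, _ | ⟨c, _ | ⟨d, _ | ⟨e, rest⟩⟩⟩⟩ <;> simp at hx5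
        have hrest : rest ≠ [] := by simpa using hd
        have hdrop : (b :: c :: d :: e :: rest).drop 4 = rest := rfl
        rw [hdrop] at hd ⊢
        -- head chunk is [x,b,c,d,e]; tail chunks come from rest
        have hcne : pvChunks rest ≠ [] := pvChunks_ne_nil rest hrest
        obtain ⟨c0, cs, hc⟩ : ∃ c0 cs, pvChunks rest = c0 :: cs := by
          cases hpc : pvChunks rest with
          | nil => exact absurd hpc hcne
          | cons c0 cs => exact ⟨c0, cs, rfl⟩
        have hlen : rest.length ≤ n := by
          simp only [List.length_cons] at hl; omega
        have hih := ih rest hlen hrest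
        have hchunk : PySem.Str.join "" ((x :: b :: c :: d :: e :: ([] : List (String × Option String))).map (pvItem cb tcb))
            = pvG cb tcb 0 [x, b, c, d, e] := pvG_small cb tcb _ (by simp)
        have h5 : pvG cb tcb 5 rest = "\n" ++ pvG cb tcb 0 rest := by
          rw [pvG_five]; simp [hrest]
        rw [hc] at hih ⊢
        simp only [List.map_cons] at hih ⊢
        rw [pv_join_cons_cons, hih, List.take_succ_cons, List.take_succ_cons, List.take_succ_cons,
          List.take_succ_cons, List.take_zero]
        simp only [List.map_cons, List.map_nil] at hchunk ⊢
        rw [hchunk]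
        simp only [pvG, String.append_empty]
        rw [h5]
        simp [String.append_assoc]

-- ===== VERDICT (by name: the statement is the Claim_ definition above) =====
theorem common_entities_with_type_py_spec : Claim_equal_common_entities_with_type_py := by
  intro entities cb tcb _dom
  unfold Spec_common_entities_with_type_py common_entities_with_type_py common_entities_with_type_py_alt
  by_cases h : entities = []
  · simp [h]
  · simp only [h, if_false]
    rw [show (0 : Int) = ((0 : Nat) : Int) by norm_num, pvA_fold cb tcb entities 0 "",
      String.empty_append, pvB_join cb tcb entities.length entities le_rfl h]
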